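-- pv_equiv track=rewrite | github.com/LukeHebert/MOL290C_groups | group_students.py | compute_target_group_sizes
-- ===== SOURCE A (Python) =====
-- from typing import Dict, List, Tuple, Set, Optional
--
-- def compute_target_group_sizes(n: int, group_size: int) -> List[int]:
--     """Compute target sizes: ⌊n/s⌋ groups with size s and the first (n mod s) groups with size s+1."""
--     if n <= 0:
--         return []
--     if n <= group_size:
--         return [n]
--     g = n // group_size
--     r = n % group_size
--     sizes = [(group_size + 1 if i < r else group_size) for i in range(g)]
--     assert sum(sizes) == n
--     return sizes
-- ===== SOURCE B (Python) =====
-- def compute_target_group_sizes(n: int, group_size: int):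
--     """Greedy fair split: same guards as A, then decide the NUMBER of groups
--     (n // group_size) and hand out sizes one group at a time, each group taking
--     the ceiling of (students remaining / groups remaining).  No modulus, no
--     per-index branch: the balancing emerges from the running remainder."""
--     if n <= 0:
--         return []
--     if n <= group_size:
--         return [n]
--     sizes = []
--     remaining = n
--     for k in range(n // group_size, 0, -1):
--         q = -(-remaining // k)  # ceil division
--         sizes.append(q)
--         remaining -= q
--     return sizes
-- ===== Notes on version B (the rewrite author's own statement) =====
-- stated objective: alternative
-- what changed: B replaces A's divmod-and-comprehension (branching on i < n%s per index) with a greedy fair-split loop: it computes only the number of groups and then, keeping a running remainder, gives each group ceil(remaining/groups_left); the s+1/s pattern emerges from the remainder instead of being computed from n%s.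
import Mathlib
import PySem

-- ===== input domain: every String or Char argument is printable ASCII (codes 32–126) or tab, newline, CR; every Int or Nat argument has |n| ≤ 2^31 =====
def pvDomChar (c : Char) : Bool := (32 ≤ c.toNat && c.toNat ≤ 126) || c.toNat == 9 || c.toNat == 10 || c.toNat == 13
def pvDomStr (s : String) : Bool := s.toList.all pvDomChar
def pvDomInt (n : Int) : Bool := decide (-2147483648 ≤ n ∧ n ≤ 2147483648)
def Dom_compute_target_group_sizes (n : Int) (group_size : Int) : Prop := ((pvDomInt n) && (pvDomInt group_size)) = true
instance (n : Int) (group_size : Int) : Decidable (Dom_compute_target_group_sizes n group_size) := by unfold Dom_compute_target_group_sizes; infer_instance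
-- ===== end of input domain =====

-- B replaces the divmod+comprehension with a greedy fair-split loop (ceil of remaining/groups-left with a running remainder); alternative algorithm, same cost.


-- ===== PORT A =====
def compute_target_group_sizes (n : Int) (group_size : Int) : List Int :=
  if n ≤ 0 then []
  else if n ≤ group_size then [n]
  else
    let g := PySem.Int.floordiv n group_size
    let r := PySem.Int.mod n group_size
    (PySem.List.pyRange 0 g 1).map (fun i => if i < r then group_size + 1 else group_size)

-- ===== PORT B =====
def compute_target_group_sizes_alt (n : Int) (group_size : Int) : List Int :=
  if n ≤ 0 then []
  else if n ≤ group_size then [n]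
  else
    -- for k in range(n // group_size, 0, -1): q = -(-remaining // k); sizes.append(q); remaining -= q
    ((PySem.List.pyRange (PySem.Int.floordiv n group_size) 0 (-1)).foldl
      (fun (st : List Int × Int) k =>
        let q := -(PySem.Int.floordiv (-st.2) k)
        (st.1 ++ [q], st.2 - q)) ([], n)).1

-- ===== PRECONDITION & SPEC =====
-- Pre_ excludes exactly the inputs where A raises: ZeroDivisionError (group_size = 0 with 0 < n, group_size < n)
-- and the AssertionError cases (group_size < 0, or n mod group_size > n // group_size, e.g. n=7, group_size=5).
def Pre_compute_target_group_sizes (n : Int) (group_size : Int) : Prop :=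
  n ≤ 0 ∨ n ≤ group_size ∨
    (0 < group_size ∧ PySem.Int.mod n group_size ≤ PySem.Int.floordiv n group_size)
instance (n : Int) (group_size : Int) : Decidable (Pre_compute_target_group_sizes n group_size) := by
  unfold Pre_compute_target_group_sizes; infer_instance
def pvWitness_compute_target_group_sizes : Int × Int := (10, 3)
def Spec_compute_target_group_sizes (n : Int) (group_size : Int) (out : List Int) : Prop := out = compute_target_group_sizes_alt n group_size
instance (n : Int) (group_size : Int) (out : List Int) : Decidable (Spec_compute_target_group_sizes n group_size out) := by unfold Spec_compute_target_group_sizes; infer_instance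

-- ===== CLAIM (what is proved, stated in full; the proofs are below) =====
def Claim_equal_compute_target_group_sizes : Prop := ∀ (n : Int) (group_size : Int), Dom_compute_target_group_sizes n group_size → Pre_compute_target_group_sizes n group_size → Spec_compute_target_group_sizes n group_size (compute_target_group_sizes n group_size)

-- ===== LEMMAS AND PROOFS =====

-- A's range-comprehension with an 'i < r' branch is two homogeneous blocks, when 0 ≤ r ≤ g.
theorem pv_map_ite_blocks (r g a b : Int) (h0 : 0 ≤ r) (h1 : r ≤ g) :
    (PySem.List.pyRange 0 g 1).map (fun i => if i < r then a else b)
      = List.replicate r.toNat a ++ List.replicate (g - r).toNat b := by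
  rw [PySem.List.pyRange_one_append 0 r g h0 h1, List.map_append]
  congr 1
  · rw [List.map_congr_left (g := fun _ => a)
      (by intro i hi; rw [PySem.List.mem_pyRange_one] at hi; simp [hi.2])]
    simp [List.map_const', PySem.List.length_pyRange_one]
  · rw [List.map_congr_left (g := fun _ => b)
      (by intro i hi; rw [PySem.List.mem_pyRange_one] at hi; simp [Int.not_lt.mpr hi.1])]
    simp [List.map_const', PySem.List.length_pyRange_one]

-- B's greedy loop invariant: with m groups left and remaining = m*s + r (0 ≤ r ≤ m),
-- the countdown loop appends r groups of s+1 followed by m - r groups of s, ending with remainder 0.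
theorem pv_greedy_blocks (s : Int) : ∀ (m : Nat) (r : Int) (acc : List Int), 0 ≤ r → r ≤ (m : Int) →
    (PySem.List.pyRange (m : Int) 0 (-1)).foldl
      (fun (st : List Int × Int) k =>
        let q := -(PySem.Int.floordiv (-st.2) k)
        (st.1 ++ [q], st.2 - q)) (acc, (m : Int) * s + r)
      = (acc ++ (List.replicate r.toNat (s + 1) ++ List.replicate ((m : Int) - r).toNat s), 0) := by
  intro m
  induction m with
  | zero =>
    intro r acc h0 h1
    have hr : r = 0 := le_antisymm (by exact_mod_cast h1) h0
    rw [PySem.List.pyRange_neg_one_eq_nil (by norm_num)]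
    simp [hr]
  | succ m ih =>
    intro r acc h0 h1
    rw [PySem.List.pyRange_neg_one_cons (a := ((m + 1 : Nat) : Int)) (b := 0) (by positivity)]
    simp only [List.foldl_cons]
    by_cases hr : r = 0
    · have hq : PySem.Int.floordiv (-(((m + 1 : Nat) : Int) * s + r)) ((m + 1 : Nat) : Int) = -s := by
        have hM : (0:Int) < ((m + 1 : Nat) : Int) := by positivity
        rw [PySem.Int.floordiv_eq_iff_of_pos]
        · subst hr; constructor <;> nlinarith [hM]
        · positivity
      have harg : ((m + 1 : Nat) : Int) * s + r - -(-s) = (m : Int) * s + 0 := by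
        subst hr; push_cast; ring
      rw [show (((m + 1 : Nat) : Int)) - 1 = (m : Int) by push_cast; ring]
      simp only [hq, harg]
      have := ih 0 (acc ++ [- -s]) le_rfl (by exact_mod_cast Nat.zero_le m)
      rw [this]
      subst hr
      rw [neg_neg]
      simp [List.append_assoc, List.replicate_succ]
    · have hrpos : 0 < r := lt_of_le_of_ne h0 (Ne.symm hr)
      have hq : PySem.Int.floordiv (-(((m + 1 : Nat) : Int) * s + r)) ((m + 1 : Nat) : Int) = -(s + 1) := by
        rw [PySem.Int.floordiv_eq_iff_of_pos]
        · constructor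
          · push_cast; push_cast at h1; nlinarith
          · push_cast; nlinarith
        · positivity
      have harg : ((m + 1 : Nat) : Int) * s + r - -(-(s + 1)) = (m : Int) * s + (r - 1) := by
        push_cast; ring
      rw [show (((m + 1 : Nat) : Int)) - 1 = (m : Int) by push_cast; ring]
      simp only [hq, harg]
      have := ih (r - 1) (acc ++ [- -(s + 1)]) (by omega) (by push_cast at h1 ⊢; omega)
      rw [this]
      rw [neg_neg]
      have hrep : [s + 1] ++ List.replicate (r - 1).toNat (s + 1) = List.replicate r.toNat (s + 1) := by
        rw [show r.toNat = (r - 1).toNat + 1 by omega]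
        simp [List.replicate_succ]
      have hmr : ((m : Int) - (r - 1)).toNat = (((m + 1 : Nat) : Int) - r).toNat := by
        push_cast; omega
      rw [List.append_assoc, ← List.append_assoc [s + 1], hrep, hmr]

-- ===== VERDICT (by name: the statement is the Claim_ definition above) =====
theorem compute_target_group_sizes_spec : Claim_equal_compute_target_group_sizes := by
  intro n gs _ hpre
  unfold Spec_compute_target_group_sizes compute_target_group_sizes compute_target_group_sizes_alt
  split_ifs with h1 h2
  · rfl
  · rfl
  · rcases hpre with h | h | ⟨hgs, hle⟩
    · omega
    · omega
    · set g := PySem.Int.floordiv n gs with hg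
      set r := PySem.Int.mod n gs with hr
      have hr0 : 0 ≤ r := by
        rw [hr, PySem.Int.mod_eq_emod_of_pos hgs]; exact Int.emod_nonneg n (by omega)
      have hg0 : 0 ≤ g := le_trans hr0 hle
      have hngr : n = g * gs + r := by
        have := PySem.Int.floordiv_mul_add_mod n gs
        rw [← hg, ← hr] at this; linarith
      have hB := pv_greedy_blocks gs g.toNat r [] hr0 (by rwa [Int.toNat_of_nonneg hg0])
      rw [Int.toNat_of_nonneg hg0] at hB
      rw [← hngr] at hB
      simp only [hB, List.nil_append]
      simpa using pv_map_ite_blocks r g (gs + 1) gs hr0 hle
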